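-- pv_equiv track=rewrite | github.com/sdsubhajitdas/Practice-Problems | CodeChef/LAPIN.py | checkLapalindrome
-- ===== SOURCE A (Python) =====
-- def checkLapalindrome(word:str) -> bool:
--     wordLen = len(word)
--     left, right = None, None
--
--     if(wordLen % 2 == 0):
--         left = right =  wordLen//2
--     else:
--         left = wordLen//2
--         right = left + 1
--
--     table = dict().fromkeys(word[0:left],0)
--
--     for char in word[:left]:
--         table[char] += 1
--
--     for char in word[right:]:
--         if(table.get(char,-1) != -1):
--             table[char] -= 1
--         else:
--             return False
--
--     for key in table.keys():
--         if(table[key] != 0):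
--             return False
--
--     return True
-- ===== SOURCE B (Python) =====
-- def checkLapalindrome(word: str) -> bool:
--     n = len(word)
--     left = word[:n // 2]
--     right = word[(n + 1) // 2:]
--     return sorted(left) == sorted(right)
-- ===== Notes on version B (the rewrite author's own statement) =====
-- stated objective: simpler
-- what changed: Replaces the hand-rolled dict counting with early returns and a final zero-check by slicing the two halves once and comparing their sorted character lists.
import Mathlib
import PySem

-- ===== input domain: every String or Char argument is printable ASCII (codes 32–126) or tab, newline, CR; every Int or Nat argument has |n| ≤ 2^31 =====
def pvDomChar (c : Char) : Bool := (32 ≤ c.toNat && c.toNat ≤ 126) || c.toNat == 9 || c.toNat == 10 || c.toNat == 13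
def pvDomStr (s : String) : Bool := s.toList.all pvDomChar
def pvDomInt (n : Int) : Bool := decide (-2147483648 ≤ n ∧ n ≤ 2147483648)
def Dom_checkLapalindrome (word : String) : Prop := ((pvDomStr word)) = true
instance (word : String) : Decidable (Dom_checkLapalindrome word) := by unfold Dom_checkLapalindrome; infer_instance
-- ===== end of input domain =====

-- B replaces A's hand-rolled dict counting (with early returns and a final zero-check) by
-- slicing the two halves once and comparing their sorted character lists (objective: simpler).

-- ===== PORT A =====
-- A's second loop ('for char in word[right:]'), with its early 'return False' as an Option:
-- none = the function returned False from inside the loop.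
def lapScanRight (d : PySem.Dict Char Int) : List Char → Option (PySem.Dict Char Int)
  | [] => some d
  | c :: rest =>
      if d.getD c (-1) != -1 then
        -- table[char] -= 1 : the guard just ruled out absence (get(char,-1) would be -1),
        -- so the read table[char] equals d.getD c (-1) and the write is an insert.
        lapScanRight (d.insert c (d.getD c (-1) - 1)) rest
      else none

-- A's tail after the second loop: False if the loop returned early, otherwise
-- 'for key in table.keys(): if table[key] != 0: return False / return True'.
def lapFinish (o : Option (PySem.Dict Char Int)) : Bool :=
  match o with
  | none => false
  | some t => t.keys.all (fun k => t.getD k 0 == 0)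

def checkLapalindrome (word : String) : Bool :=
  let wordLen : Int := PySem.Str.len word
  let left : Int := PySem.Int.floordiv wordLen 2
  let right : Int := if PySem.Int.mod wordLen 2 == 0 then left else left + 1
  -- table = dict().fromkeys(word[0:left], 0)
  let table0 : PySem.Dict Char Int :=
    (PySem.List.slice word.toList (some 0) (some left)).foldl
      (fun d c => d.insert c 0) PySem.Dict.empty
  -- for char in word[:left]: table[char] += 1   (char is always a key here, so the read
  -- table[char] equals d.getD char 0 and the write is an insert)
  let table : PySem.Dict Char Int :=
    (PySem.List.slice word.toList none (some left)).foldl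
      (fun d c => d.insert c (d.getD c 0 + 1)) table0
  lapFinish (lapScanRight table (PySem.List.slice word.toList (some right) none))

-- ===== PORT B =====
def checkLapalindrome_alt (word : String) : Bool :=
  let n : Int := PySem.Str.len word
  let leftHalf := PySem.List.slice word.toList none (some (PySem.Int.floordiv n 2))
  let rightHalf := PySem.List.slice word.toList (some (PySem.Int.floordiv (n + 1) 2)) none
  PySem.List.sorted leftHalf (fun x => x) == PySem.List.sorted rightHalf (fun x => x)

-- ===== PRECONDITION & SPEC =====
def Spec_checkLapalindrome (word : String) (out : Bool) : Prop := out = checkLapalindrome_alt word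
instance (word : String) (out : Bool) : Decidable (Spec_checkLapalindrome word out) := by unfold Spec_checkLapalindrome; infer_instance

-- ===== CLAIM (what is proved, stated in full; the proofs are below) =====
def Claim_equal_checkLapalindrome : Prop := ∀ (word : String), Dom_checkLapalindrome word → Spec_checkLapalindrome word (checkLapalindrome word)

-- ===== LEMMAS AND PROOFS =====

-- two different defaults agree on a present key
theorem lap_getD_swap (d : PySem.Dict Char Int) (k : Char) (a b : Int)
    (h : d.contains k = true) : d.getD k a = d.getD k b := by
  rw [PySem.Dict.contains_eq_isSome_get?] at h
  obtain ⟨v, hv⟩ := Option.isSome_iff_exists.mp h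
  rw [PySem.Dict.getD_of_get?_eq_some d a hv, PySem.Dict.getD_of_get?_eq_some d b hv]

theorem lap_contains_of_getD_ne (d : PySem.Dict Char Int) (k : Char) (v : Int)
    (h : d.getD k v ≠ v) : d.contains k = true := by
  by_contra hc
  exact h (PySem.Dict.getD_of_not_contains d v (Bool.not_eq_true _ ▸ hc))

-- fromkeys: lookup in the first fold
theorem lap_get?_fromkeys (l : List Char) : ∀ (d : PySem.Dict Char Int) (c : Char),
    (l.foldl (fun d c => d.insert c 0) d).get? c = if c ∈ l then some 0 else d.get? c := by
  induction l with
  | nil => simp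
  | cons x xs ih =>
      intro d c
      simp only [List.foldl_cons, ih, List.mem_cons]
      by_cases hx : c = x
      · simp [hx]
      · by_cases hm : c ∈ xs <;> simp [hm, hx, PySem.Dict.get?_insert]

-- the key lemma: A's scan + final zero-check, characterised by counts
theorem lap_scan_char (S : List Char) : ∀ (d : PySem.Dict Char Int),
    (lapFinish (lapScanRight d S) = true ↔
      ∀ c : Char, (c ∈ S ∨ d.contains c = true) → d.getD c (-1) = (S.count c : Int)) := by
  induction S with
  | nil =>
      intro d
      simp only [lapScanRight, lapFinish, List.all_eq_true, List.not_mem_nil, false_or,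
        List.count_nil, Nat.cast_zero, beq_iff_eq]
      constructor
      · intro h c hc
        rw [lap_getD_swap d c (-1) 0 hc]
        exact h c ((PySem.Dict.contains_iff_mem_keys d c).mp hc)
      · intro h k hk
        have hc : d.contains k = true := (PySem.Dict.contains_iff_mem_keys d k).mpr hk
        rw [lap_getD_swap d k 0 (-1) hc]
        exact h k hc
  | cons x xs ih =>
      intro d
      simp only [lapScanRight]
      by_cases hg : d.getD x (-1) = -1
      · rw [show (d.getD x (-1) != -1) = false by simp [hg]]
        simp only [Bool.false_eq_true, if_false]
        refine iff_of_false (by simp [lapFinish]) ?_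
        intro h
        have hx := h x (Or.inl List.mem_cons_self)
        rw [hg, List.count_cons_self] at hx
        push_cast at hx
        omega
      · rw [show (d.getD x (-1) != -1) = true by simpa using hg]
        simp only [if_true]
        have hcx : d.contains x = true := lap_contains_of_getD_ne d x (-1) hg
        rw [ih]
        constructor
        · intro h c hc
          by_cases hxc : c = x
          · subst hxc
            have hv := h c (Or.inr (PySem.Dict.contains_insert_self d c _))
            rw [PySem.Dict.getD_insert, if_pos rfl] at hv
            rw [List.count_cons_self]
            push_cast
            omega
          · have hc' : c ∈ xs ∨ (d.insert x (d.getD x (-1) - 1)).contains c = true := by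
              rcases hc with hm | hco
              · rcases List.mem_cons.mp hm with h1 | h2
                · exact absurd h1 hxc
                · exact Or.inl h2
              · right
                rw [PySem.Dict.contains_insert]
                simp [hco]
            have hv := h c hc'
            rw [PySem.Dict.getD_insert, if_neg hxc] at hv
            rw [hv]
            have hne : ¬ x = c := fun hh => hxc hh.symm
            congr 1
            simp [hne]
        · intro h c hc
          rw [PySem.Dict.getD_insert]
          by_cases hxc : c = x
          · subst hxc
            have hv := h c (Or.inl List.mem_cons_self)
            rw [List.count_cons_self] at hv
            rw [if_pos rfl, hv]
            push_cast
            omega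
          · rw [if_neg hxc]
            have hc' : c ∈ x :: xs ∨ d.contains c = true := by
              rcases hc with hm | hco
              · exact Or.inl (List.mem_cons_of_mem _ hm)
              · right
                rw [PySem.Dict.contains_insert] at hco
                rcases Bool.or_eq_true_iff.mp hco with h1 | h2
                · exact absurd (eq_of_beq h1) hxc
                · exact h2
            have hv := h c hc'
            rw [hv]
            have hne : ¬ x = c := fun hh => hxc hh.symm
            congr 1
            simp [hne]

-- the table after A's two building loops contains exactly the chars of the left half L
theorem lap_table_contains (L : List Char) (x : Char) :
    ((L.foldl (fun d c => d.insert c (d.getD c 0 + 1))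
        (L.foldl (fun d c => d.insert c (0:Int)) PySem.Dict.empty)).contains x = true) ↔ x ∈ L := by
  rw [PySem.Dict.contains_eq_decide_mem_keys,
    PySem.Dict.keys_foldl_insert, PySem.Dict.keys_foldl_insert]
  rw [decide_eq_true_iff, PySem.Set.mem_update, PySem.Set.mem_update, PySem.Dict.keys_empty]
  simp

-- its lookup (with default -1, the one A's second loop uses)
theorem lap_table_getD (L : List Char) (c : Char) :
    ((L.foldl (fun d c => d.insert c (d.getD c 0 + 1))
        (L.foldl (fun d c => d.insert c (0:Int)) PySem.Dict.empty)).getD c (-1))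
      = if c ∈ L then (L.count c : Int) else -1 := by
  set t : PySem.Dict Char Int := L.foldl (fun d c => d.insert c (d.getD c 0 + 1))
    (L.foldl (fun d c => d.insert c (0:Int)) PySem.Dict.empty) with ht
  have hgetD0 : t.getD c 0 = (L.count c : Int) := by
    rw [ht, PySem.Dict.getD_foldl_insert_add_one,
      PySem.Dict.getD_eq_get?_getD, lap_get?_fromkeys]
    by_cases hm : c ∈ L <;> simp [hm, PySem.Dict.get?_empty]
  by_cases hm : c ∈ L
  · have hc : t.contains c = true := (lap_table_contains L c).mpr hm
    rw [lap_getD_swap t c (-1) 0 hc, hgetD0, if_pos hm]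
  · have hc : t.contains c = false := by
      rw [← Bool.not_eq_true]
      exact fun h => hm ((lap_table_contains L c).mp h)
    rw [PySem.Dict.getD_of_not_contains t (-1) hc, if_neg hm]

-- A on the two halves (as take/drop of the char list)
theorem lap_A_char (word : String) :
    (checkLapalindrome word = true ↔
      ∀ c : Char, (word.toList.take (word.toList.length / 2)).count c
        = (word.toList.drop ((word.toList.length + 1) / 2)).count c) := by
  set cs := word.toList with hcs
  set L := cs.take (cs.length / 2) with hL
  set R := cs.drop ((cs.length + 1) / 2) with hR
  have hlen : PySem.Str.len word = (cs.length : Int) := PySem.Str.len_eq word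
  have hleft : PySem.Int.floordiv (PySem.Str.len word) 2 = ((cs.length / 2 : Nat) : Int) := by
    rw [hlen]; exact_mod_cast PySem.Int.floordiv_natCast cs.length 2
  have hsliceL : PySem.List.slice cs none (some (PySem.Int.floordiv (PySem.Str.len word) 2)) = L := by
    rw [hleft, PySem.List.slice_to cs (by positivity), Int.toNat_natCast]
  have hslice0L : PySem.List.slice cs (some 0)
      (some (PySem.Int.floordiv (PySem.Str.len word) 2)) = L := by
    rw [PySem.List.slice_zero_start, hsliceL]
  have hright : (if PySem.Int.mod (PySem.Str.len word) 2 == 0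
        then PySem.Int.floordiv (PySem.Str.len word) 2
        else PySem.Int.floordiv (PySem.Str.len word) 2 + 1)
      = (((cs.length + 1) / 2 : Nat) : Int) := by
    have hmod : PySem.Int.mod (PySem.Str.len word) 2 = ((cs.length % 2 : Nat) : Int) := by
      rw [hlen]; exact_mod_cast PySem.Int.mod_natCast cs.length 2
    rcases Nat.even_or_odd cs.length with he | ho
    · have h2 : cs.length % 2 = 0 := Nat.even_iff.mp he
      rw [hmod, h2, hleft]
      simp only [Nat.cast_zero, beq_self_eq_true, if_true]
      omega
    · have h2 : cs.length % 2 = 1 := Nat.odd_iff.mp ho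
      rw [hmod, h2, hleft]
      rw [if_neg (by decide)]
      omega
  have hsliceR : PySem.List.slice cs
      (some (if PySem.Int.mod (PySem.Str.len word) 2 == 0
        then PySem.Int.floordiv (PySem.Str.len word) 2
        else PySem.Int.floordiv (PySem.Str.len word) 2 + 1)) none = R := by
    rw [hright, PySem.List.slice_from cs (by positivity), Int.toNat_natCast]
  have hA : checkLapalindrome word
      = lapFinish (lapScanRight
          (L.foldl (fun d c => d.insert c (d.getD c 0 + 1))
            (L.foldl (fun d c => d.insert c (0:Int)) PySem.Dict.empty)) R) := by
    simp only [checkLapalindrome]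
    rw [← hcs, hslice0L, hsliceL, hsliceR]
  rw [hA, lap_scan_char]
  constructor
  · intro h c
    by_cases hm : c ∈ L
    · have hv := h c (Or.inr ((lap_table_contains L c).mpr hm))
      rw [lap_table_getD, if_pos hm] at hv
      exact_mod_cast hv
    · by_cases hr : c ∈ R
      · have hv := h c (Or.inl hr)
        rw [lap_table_getD, if_neg hm] at hv
        have hpos : 0 < R.count c := List.count_pos_iff.mpr hr
        omega
      · rw [List.count_eq_zero_of_not_mem hm, List.count_eq_zero_of_not_mem hr]
  · intro h c hc
    rw [lap_table_getD]
    by_cases hm : c ∈ L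
    · rw [if_pos hm]; exact_mod_cast h c
    · rw [if_neg hm]
      rcases hc with hr | hco
      · have hpos : 0 < R.count c := List.count_pos_iff.mpr hr
        have h0 : L.count c = 0 := List.count_eq_zero_of_not_mem hm
        have hv := h c
        omega
      · exact absurd ((lap_table_contains L c).mp hco) hm

-- B on the two halves
theorem lap_B_char (word : String) :
    (checkLapalindrome_alt word = true ↔
      (word.toList.take (word.toList.length / 2)).Perm
        (word.toList.drop ((word.toList.length + 1) / 2))) := by
  set cs := word.toList with hcs
  have hlen : PySem.Str.len word = (cs.length : Int) := PySem.Str.len_eq word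
  have hleft : PySem.Int.floordiv (PySem.Str.len word) 2 = ((cs.length / 2 : Nat) : Int) := by
    rw [hlen]; exact_mod_cast PySem.Int.floordiv_natCast cs.length 2
  have hright : PySem.Int.floordiv (PySem.Str.len word + 1) 2
      = (((cs.length + 1) / 2 : Nat) : Int) := by
    rw [hlen, show ((cs.length : Int) + 1) = ((cs.length + 1 : Nat) : Int) by push_cast; ring]
    exact_mod_cast PySem.Int.floordiv_natCast (cs.length + 1) 2
  simp only [checkLapalindrome_alt]
  rw [← hcs, hleft, hright, PySem.List.slice_to cs (by positivity),
    PySem.List.slice_from cs (by positivity), Int.toNat_natCast, Int.toNat_natCast]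
  rw [beq_iff_eq]
  exact PySem.List.sorted_id_eq_sorted_id_iff_perm _ _

-- ===== VERDICT (by name: the statement is the Claim_ definition above) =====
theorem checkLapalindrome_spec : Claim_equal_checkLapalindrome := by
  intro word _
  unfold Spec_checkLapalindrome
  rw [Bool.eq_iff_iff, lap_A_char, lap_B_char]
  exact (List.perm_iff_count).symm
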